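-- pv_equiv track=rewrite | github.com/jongmung/Coding_Study | 8week.py | solution
-- ===== SOURCE A (Python) =====
-- def solution(numbers, hand):
--     num = { 1 : [0,0], 2 : [0,1], 3 : [0,2],
--            4 : [1,0], 5 : [1,1], 6 : [1,2],
--            7 : [2,0], 8 : [2,1], 9 : [2,2],
--           '*' : [3,0], 0 : [3,1], '#' : [3,2] }
--     answer = ''
--     r = num['#']
--     l = num['*']
--     for i in numbers:
--         now = num[i]
--
--         if i in [1, 4, 7]:
--             l = now
--             answer += 'L'
--         elif i in [3, 6, 9]:
--             r = now
--             answer += 'R'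
--         else:
--             l_d = 0
--             r_d = 0
--
--             for x, y, z in zip(l, r, now):
--                 l_d += abs(x - z)
--                 r_d += abs(y - z)
--
--             if l_d < r_d:
--                 l = now
--                 answer += 'L'
--             elif l_d > r_d:
--                 r = now
--                 answer += 'R'
--             else:
--                 if hand == 'right':
--                     r = now
--                     answer += 'R'
--                 else:
--                     l = now
--                     answer += 'L'
--     return answer
-- ===== SOURCE B (Python) =====
-- def solution(numbers, hand):
--     # Keypad modelled as a flat 4x3 grid: key k lives at (k // 3, k % 3).
--     def keypos(d):
--         if not 0 <= d <= 9:
--             raise KeyError(d)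
--         return 10 if d == 0 else d - 1
--
--     def dist(a, b):
--         return abs(a // 3 - b // 3) + abs(a % 3 - b % 3)
--
--     def go(ds, l, r):
--         if not ds:
--             return ''
--         k = keypos(ds[0])
--         col = k % 3
--         if col == 0:
--             side = 'L'
--         elif col == 2:
--             side = 'R'
--         elif dist(l, k) != dist(r, k):
--             side = 'L' if dist(l, k) < dist(r, k) else 'R'
--         else:
--             side = 'R' if hand == 'right' else 'L'
--         rest = go(ds[1:], k, r) if side == 'L' else go(ds[1:], l, k)
--         return side + rest
--
--     return go(numbers, 9, 11)  # '*' is grid cell 9, '#' is grid cell 11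
-- ===== Notes on version B (the rewrite author's own statement) =====
-- stated objective: alternative
-- what changed: B replaces A's dict of coordinate lists and membership-list tests by a flat 4x3 grid encoding (each key is a single integer cell, row = k//3, col = k%3): thumb state is two cell numbers instead of coordinate pairs, the forced thumb is read off the cell's column, distances come from one reusable dist helper on cells, and the output string is built on return by recursion instead of A's imperative accumulator loop.
import Mathlib
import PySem

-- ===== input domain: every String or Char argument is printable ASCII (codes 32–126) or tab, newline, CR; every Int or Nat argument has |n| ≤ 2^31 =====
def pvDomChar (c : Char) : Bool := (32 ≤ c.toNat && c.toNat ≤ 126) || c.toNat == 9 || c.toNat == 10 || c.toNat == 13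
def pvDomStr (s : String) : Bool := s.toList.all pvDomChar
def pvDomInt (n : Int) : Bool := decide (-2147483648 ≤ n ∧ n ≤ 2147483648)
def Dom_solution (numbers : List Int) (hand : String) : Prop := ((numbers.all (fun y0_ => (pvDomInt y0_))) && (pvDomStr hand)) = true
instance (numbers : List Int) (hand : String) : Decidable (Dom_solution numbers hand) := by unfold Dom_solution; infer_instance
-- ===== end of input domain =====

-- B re-encodes the keypad as flat grid cells (one Int per key) with a recursive,
-- return-built output string instead of A's coordinate-pair dict and accumulator loop.

-- ===== PORT A =====
-- A's dict 'num' as a lookup table on the Int keys 0..9 (the '*'/'#' entries are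
-- only read once, at the initialisation of l and r, and are inlined there);
-- none = KeyError (A raises on numbers outside 0..9, excluded by Pre_solution).
def numGet (i : Int) : Option (Int × Int) :=
  if i = 1 then some (0,0) else if i = 2 then some (0,1) else if i = 3 then some (0,2)
  else if i = 4 then some (1,0) else if i = 5 then some (1,1) else if i = 6 then some (1,2)
  else if i = 7 then some (2,0) else if i = 8 then some (2,1) else if i = 9 then some (2,2)
  else if i = 0 then some (3,1) else none

-- the for loop of A; the inner zip loop over the two-element coordinate lists is
-- unrolled (exact: the lists always have length 2); none propagates a KeyError.
def solutionGo (numbers : List Int) (hand : String) (answer : String)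
    (l r : Int × Int) : Option String :=
  match numbers with
  | [] => some answer
  | i :: rest =>
    match numGet i with
    | none => none
    | some now =>
      if i = 1 ∨ i = 4 ∨ i = 7 then
        solutionGo rest hand (answer ++ "L") now r
      else if i = 3 ∨ i = 6 ∨ i = 9 then
        solutionGo rest hand (answer ++ "R") l now
      else
        let l_d := |l.1 - now.1| + |l.2 - now.2|
        let r_d := |r.1 - now.1| + |r.2 - now.2|
        if l_d < r_d then solutionGo rest hand (answer ++ "L") now r
        else if l_d > r_d then solutionGo rest hand (answer ++ "R") l now
        else if hand = "right" then solutionGo rest hand (answer ++ "R") l now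
        else solutionGo rest hand (answer ++ "L") now r

def solution (numbers : List Int) (hand : String) : String :=
  (solutionGo numbers hand "" (3,0) (3,2)).getD ""  -- getD unreachable under Pre_solution

-- ===== PORT B =====
-- keypos: the flat grid cell of a digit; none = Source B's 'raise KeyError' for digits
-- outside 0..9 (excluded by Pre_solution).
def keyposB (d : Int) : Option Int :=
  if 0 ≤ d ∧ d ≤ 9 then some (if d = 0 then 10 else d - 1) else none

def distB (a b : Int) : Int :=
  |PySem.Int.floordiv a 3 - PySem.Int.floordiv b 3| +
  |PySem.Int.mod a 3 - PySem.Int.mod b 3|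

-- Source B's recursive go, building the string on return; none propagates KeyError.
def solutionAltGo (hand : String) (ds : List Int) (l r : Int) : Option String :=
  match ds with
  | [] => some ""
  | d :: rest =>
    match keyposB d with
    | none => none
    | some k =>
      let col := PySem.Int.mod k 3
      let side : String :=
        if col = 0 then "L"
        else if col = 2 then "R"
        else if distB l k ≠ distB r k then
          (if distB l k < distB r k then "L" else "R")
        else if hand = "right" then "R" else "L"
      (if side = "L" then solutionAltGo hand rest k r
       else solutionAltGo hand rest l k).map (fun rest' => side ++ rest')

def solution_alt (numbers : List Int) (hand : String) : String :=
  (solutionAltGo hand numbers 9 11).getD ""  -- getD unreachable under Pre_solution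

-- ===== PRECONDITION & SPEC =====
-- Pre_ excludes exactly the inputs where both programs raise KeyError: a number outside 0..9.
def Pre_solution (numbers : List Int) (hand : String) : Prop :=
  ∀ i ∈ numbers, 0 ≤ i ∧ i ≤ 9
instance (numbers : List Int) (hand : String) : Decidable (Pre_solution numbers hand) := by
  unfold Pre_solution; infer_instance
def pvWitness_solution : List Int × String := ([1, 3, 4, 5, 8, 2, 1, 4, 5, 9, 5], "right")

def Spec_solution (numbers : List Int) (hand : String) (out : String) : Prop := out = solution_alt numbers hand
instance (numbers : List Int) (hand : String) (out : String) : Decidable (Spec_solution numbers hand out) := by unfold Spec_solution; infer_instance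

-- ===== CLAIM (what is proved, stated in full; the proofs are below) =====
def Claim_equal_solution : Prop := ∀ (numbers : List Int) (hand : String), Dom_solution numbers hand → Pre_solution numbers hand → Spec_solution numbers hand (solution numbers hand)

-- ===== LEMMAS AND PROOFS =====
-- pairOf: the coordinates A tracks for the cell number B tracks.
def pairOf (k : Int) : Int × Int := (PySem.Int.floordiv k 3, PySem.Int.mod k 3)

set_option maxHeartbeats 1000000 in
theorem go_eq (numbers : List Int) (hand : String) :
    ∀ (acc : String) (kl kr : Int),
      (∀ i ∈ numbers, 0 ≤ i ∧ i ≤ 9) →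
      solutionGo numbers hand acc (pairOf kl) (pairOf kr) =
        (solutionAltGo hand numbers kl kr).map (fun s => acc ++ s) := by
  induction numbers with
  | nil => intro acc kl kr _; simp [solutionGo, solutionAltGo]
  | cons d rest ih =>
    intro acc kl kr hpre
    obtain ⟨h0, h9⟩ := hpre d (List.mem_cons_self ..)
    have hrest : ∀ i ∈ rest, 0 ≤ i ∧ i ≤ 9 := fun i hi => hpre i (List.mem_cons_of_mem _ hi)
    have hld : ∀ k : Int, |(pairOf kl).1 - (pairOf k).1| + |(pairOf kl).2 - (pairOf k).2|
        = distB kl k := fun k => rfl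
    have hrd : ∀ k : Int, |(pairOf kr).1 - (pairOf k).1| + |(pairOf kr).2 - (pairOf k).2|
        = distB kr k := fun k => rfl
    interval_cases d <;>
      simp only [solutionGo, solutionAltGo, numGet, keyposB] <;> norm_num
    · -- d = 0, cell 10 at (3,1): middle column
      have e1 := hld 10; have e2 := hrd 10
      simp only [show pairOf 10 = ((3:Int),(1:Int)) from by decide] at e1 e2
      rw [e1, e2, show ((3:Int),(1:Int)) = pairOf 10 from by decide]
      rcases lt_trichotomy (distB kl 10) (distB kr 10) with h|h|h
      · rw [if_pos h, ih (acc ++ "L") 10 kr hrest]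
        simp [h, h.ne, Function.comp_def, String.append_assoc]
      · rw [if_neg (by omega), if_neg (by omega)]
        by_cases hh : hand = "right"
        · rw [if_pos hh, ih (acc ++ "R") kl 10 hrest]
          simp [h, hh, Function.comp_def, String.append_assoc]
        · rw [if_neg hh, ih (acc ++ "L") 10 kr hrest]
          simp [h, hh, Function.comp_def, String.append_assoc]
      · rw [if_neg (by omega), if_pos h, ih (acc ++ "R") kl 10 hrest]
        simp [h.ne', not_lt_of_gt h, Function.comp_def, String.append_assoc]
    · -- d = 1, cell 0: left column
      rw [show ((0:Int),(0:Int)) = pairOf 0 from by decide, ih (acc ++ "L") 0 kr hrest]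
      simp [Function.comp_def, String.append_assoc]
    · -- d = 2, cell 1 at (0,1): middle column
      have e1 := hld 1; have e2 := hrd 1
      simp only [show pairOf 1 = ((0:Int),(1:Int)) from by decide] at e1 e2
      norm_num at e1 e2
      rw [e1, e2, show ((0:Int),(1:Int)) = pairOf 1 from by decide]
      rcases lt_trichotomy (distB kl 1) (distB kr 1) with h|h|h
      · rw [if_pos h, ih (acc ++ "L") 1 kr hrest]
        simp [h, h.ne, Function.comp_def, String.append_assoc]
      · rw [if_neg (by omega), if_neg (by omega)]
        by_cases hh : hand = "right"
        · rw [if_pos hh, ih (acc ++ "R") kl 1 hrest]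
          simp [h, hh, Function.comp_def, String.append_assoc]
        · rw [if_neg hh, ih (acc ++ "L") 1 kr hrest]
          simp [h, hh, Function.comp_def, String.append_assoc]
      · rw [if_neg (by omega), if_pos h, ih (acc ++ "R") kl 1 hrest]
        simp [h.ne', not_lt_of_gt h, Function.comp_def, String.append_assoc]
    · -- d = 3, cell 2: right column
      rw [show ((0:Int),(2:Int)) = pairOf 2 from by decide, ih (acc ++ "R") kl 2 hrest]
      simp [Function.comp_def, String.append_assoc]
    · -- d = 4, cell 3: left column
      rw [show ((1:Int),(0:Int)) = pairOf 3 from by decide, ih (acc ++ "L") 3 kr hrest]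
      simp [Function.comp_def, String.append_assoc]
    · -- d = 5, cell 4 at (1,1): middle column
      have e1 := hld 4; have e2 := hrd 4
      simp only [show pairOf 4 = ((1:Int),(1:Int)) from by decide] at e1 e2
      rw [e1, e2, show ((1:Int),(1:Int)) = pairOf 4 from by decide]
      rcases lt_trichotomy (distB kl 4) (distB kr 4) with h|h|h
      · rw [if_pos h, ih (acc ++ "L") 4 kr hrest]
        simp [h, h.ne, Function.comp_def, String.append_assoc]
      · rw [if_neg (by omega), if_neg (by omega)]
        by_cases hh : hand = "right"
        · rw [if_pos hh, ih (acc ++ "R") kl 4 hrest]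
          simp [h, hh, Function.comp_def, String.append_assoc]
        · rw [if_neg hh, ih (acc ++ "L") 4 kr hrest]
          simp [h, hh, Function.comp_def, String.append_assoc]
      · rw [if_neg (by omega), if_pos h, ih (acc ++ "R") kl 4 hrest]
        simp [h.ne', not_lt_of_gt h, Function.comp_def, String.append_assoc]
    · -- d = 6, cell 5: right column
      rw [show ((1:Int),(2:Int)) = pairOf 5 from by decide, ih (acc ++ "R") kl 5 hrest]
      simp [Function.comp_def, String.append_assoc]
    · -- d = 7, cell 6: left column
      rw [show ((2:Int),(0:Int)) = pairOf 6 from by decide, ih (acc ++ "L") 6 kr hrest]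
      simp [Function.comp_def, String.append_assoc]
    · -- d = 8, cell 7 at (2,1): middle column
      have e1 := hld 7; have e2 := hrd 7
      simp only [show pairOf 7 = ((2:Int),(1:Int)) from by decide] at e1 e2
      rw [e1, e2, show ((2:Int),(1:Int)) = pairOf 7 from by decide]
      rcases lt_trichotomy (distB kl 7) (distB kr 7) with h|h|h
      · rw [if_pos h, ih (acc ++ "L") 7 kr hrest]
        simp [h, h.ne, Function.comp_def, String.append_assoc]
      · rw [if_neg (by omega), if_neg (by omega)]
        by_cases hh : hand = "right"
        · rw [if_pos hh, ih (acc ++ "R") kl 7 hrest]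
          simp [h, hh, Function.comp_def, String.append_assoc]
        · rw [if_neg hh, ih (acc ++ "L") 7 kr hrest]
          simp [h, hh, Function.comp_def, String.append_assoc]
      · rw [if_neg (by omega), if_pos h, ih (acc ++ "R") kl 7 hrest]
        simp [h.ne', not_lt_of_gt h, Function.comp_def, String.append_assoc]
    · -- d = 9, cell 8: right column
      rw [show ((2:Int),(2:Int)) = pairOf 8 from by decide, ih (acc ++ "R") kl 8 hrest]
      simp [Function.comp_def, String.append_assoc]

-- ===== VERDICT (by name: the statement is the Claim_ definition above) =====
theorem solution_spec : Claim_equal_solution := by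
  intro numbers hand _ hpre
  unfold Spec_solution solution solution_alt
  have h9 : pairOf 9 = (3,0) := by decide
  have h11 : pairOf 11 = (3,2) := by decide
  rw [← h9, ← h11, go_eq numbers hand "" 9 11 hpre]
  simp
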